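-- pv_equiv track=rewrite | github.com/lodyga/Python | combinatorics.py | permutationsWithRepetition
-- ===== SOURCE A (Python) =====
-- def permutationsWithRepetition(numbers: list[int], target: int) -> list[list[int]]:
--     # numbers.sort(reverse=True)
--     permutation = []
--     permutation_list = []
--
--     def dfs(target):
--         if target < 0:
--             return
--         elif target == 0:
--             permutation_list.append(permutation.copy())
--             return
--
--         for number in numbers:
--             permutation.append(number)
--             dfs(target - number)
--             permutation.pop()
--
--     dfs(target)
--     return permutation_list
-- ===== SOURCE B (Python) =====
-- def permutationsWithRepetition(numbers: list[int], target: int) -> list[list[int]]: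
--     if target < 0:
--         return []
--     table = [[] for _ in range(target + 1)]
--     table[0] = [[]]
--     for t in range(1, target + 1):
--         table[t] = [[n] + rest for n in numbers if 0 <= t - n < t for rest in table[t - n]]
--     return table[target]
-- ===== Notes on version B (the rewrite author's own statement) =====
-- stated objective: alternative
-- what changed: Replaced recursive backtracking over a shared mutable prefix list with an iterative bottom-up dynamic-programming table indexed by the remaining sum, filled from 0 to target by a list comprehension.
import Mathlib
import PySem

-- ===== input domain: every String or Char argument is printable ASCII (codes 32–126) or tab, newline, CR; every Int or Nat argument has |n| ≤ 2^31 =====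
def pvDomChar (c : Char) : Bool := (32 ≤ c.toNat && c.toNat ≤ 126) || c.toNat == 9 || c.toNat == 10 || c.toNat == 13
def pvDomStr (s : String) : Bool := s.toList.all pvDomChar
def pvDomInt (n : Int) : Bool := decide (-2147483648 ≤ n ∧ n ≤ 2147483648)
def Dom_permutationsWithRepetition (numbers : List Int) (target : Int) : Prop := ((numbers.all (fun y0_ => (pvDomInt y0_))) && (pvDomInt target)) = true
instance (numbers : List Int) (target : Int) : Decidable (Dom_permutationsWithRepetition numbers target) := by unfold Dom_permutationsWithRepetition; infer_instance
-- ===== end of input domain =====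

-- B replaces recursive backtracking on a shared mutable prefix by an iterative bottom-up
-- DP table indexed by the remaining sum (objective: alternative; return value only).


-- ===== PORT A =====
-- A's dfs mutates a shared `permutation` prefix and appends copies to `permutation_list`;
-- ported as a fold threading (prefix `perm`, accumulator `acc`). The `fuel` parameter only
-- makes the recursion total: inside Pre_ (all numbers positive) a depth of target.toNat+1
-- is never exhausted, so it is a pure totality guard.
def pvDfsA (numbers : List Int) (fuel : Nat) (perm : List Int) (acc : List (List Int)) (target : Int) : List (List Int) :=
  if target < 0 then acc
  else if target = 0 then acc ++ [perm]
  else match fuel with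
    | 0 => acc
    | f + 1 => numbers.foldl (fun a n => pvDfsA numbers f (perm ++ [n]) a (target - n)) acc

def permutationsWithRepetition (numbers : List Int) (target : Int) : List (List Int) :=
  pvDfsA numbers (target.toNat + 1) [] [] target

-- ===== PORT B =====
-- B builds table[0..target] bottom-up: table[t] = all sequences summing to t, each made by
-- prepending n to a sequence from table[t-n]; the Python loop over range(1, target+1)
-- becomes a foldl over List.range' 1 target.toNat that extends the table list.
def permutationsWithRepetition_alt (numbers : List Int) (target : Int) : List (List Int) :=
  if target < 0 then []
  else
    let T := target.toNat
    let table := (List.range' 1 T).foldl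
      (fun table (t : Nat) =>
        table ++ [numbers.flatMap (fun n =>
          if 0 ≤ (t : Int) - n ∧ (t : Int) - n < (t : Int) then
            (table.getD ((t : Int) - n).toNat []).map (fun rest => n :: rest)
          else [])])
      [[[]]]
    table.getD T []

-- ===== PRECONDITION & SPEC =====
-- Pre_ excludes exactly the inputs on which Python A never returns (it raises
-- RecursionError): target > 0 together with some non-positive number in the list.
def Pre_permutationsWithRepetition (numbers : List Int) (target : Int) : Prop :=
  target ≤ 0 ∨ ∀ n ∈ numbers, 0 < n
instance (numbers : List Int) (target : Int) : Decidable (Pre_permutationsWithRepetition numbers target) := by unfold Pre_permutationsWithRepetition; infer_instance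
def pvWitness_permutationsWithRepetition : List Int × Int := ([1, 2], 4)

def Spec_permutationsWithRepetition (numbers : List Int) (target : Int) (out : List (List Int)) : Prop := out = permutationsWithRepetition_alt numbers target
instance (numbers : List Int) (target : Int) (out : List (List Int)) : Decidable (Spec_permutationsWithRepetition numbers target out) := by unfold Spec_permutationsWithRepetition; infer_instance

-- ===== CLAIM (what is proved, stated in full; the proofs are below) =====
def Claim_equal_permutationsWithRepetition : Prop := ∀ (numbers : List Int) (target : Int), Dom_permutationsWithRepetition numbers target → Pre_permutationsWithRepetition numbers target → Spec_permutationsWithRepetition numbers target (permutationsWithRepetition numbers target)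

-- ===== LEMMAS AND PROOFS =====

-- pvF t = the list of all ordered sequences from `numbers` summing to t, in A's DFS order;
-- the reference value both ports are proved equal to.
def pvF (numbers : List Int) : Nat → List (List Int)
  | 0 => [[]]
  | t + 1 => numbers.flatMap (fun n =>
      if h : 0 ≤ ((t : Int) + 1) - n ∧ ((t : Int) + 1) - n < (t : Int) + 1 then
        (pvF numbers (((t : Int) + 1 - n)).toNat).map (fun rest => n :: rest)
      else [])
  decreasing_by
    omega

theorem pvF_table (numbers : List Int) (T : Nat) :
    (List.range' 1 T).foldl
      (fun table (t : Nat) =>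
        table ++ [numbers.flatMap (fun n =>
          if 0 ≤ (t : Int) - n ∧ (t : Int) - n < (t : Int) then
            (table.getD ((t : Int) - n).toNat []).map (fun rest => n :: rest)
          else [])])
      [[[]]]
    = (List.range (T + 1)).map (pvF numbers) := by
  induction T with
  | zero => simp [pvF]
  | succ k ih =>
    rw [show List.range' 1 (k + 1) = List.range' 1 k ++ [1 + k] by
          rw [List.range'_concat]; simp, show 1 + k = k + 1 by omega]
    rw [List.foldl_append, ih]
    simp only [List.foldl_cons, List.foldl_nil]
    rw [show List.range (k + 1 + 1) = List.range (k + 1) ++ [k + 1] from List.range_succ,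
        List.map_append]
    congr 1
    simp only [List.map_cons, List.map_nil]
    congr 1
    rw [pvF]
    refine Eq.symm ?_
    apply List.flatMap_congr
    intro n _
    by_cases h : 0 ≤ ((k : Int) + 1) - n ∧ ((k : Int) + 1) - n < (k : Int) + 1
    · have hc : (0 ≤ ((k:Int) + 1) - n ∧ ((k:Int) + 1) - n < ((k:Int) + 1)) := h
      rw [dif_pos h, if_pos (by push_cast; exact_mod_cast hc)]
      congr 1
      have hlt : (((k : Int) + 1 - n)).toNat < k + 1 := by omega
      have : (((k + 1 : Nat) : Int) - n).toNat = (((k : Int) + 1 - n)).toNat := by push_cast; rfl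
      rw [this, List.getD_eq_getElem _ _ (by simpa using hlt)]
      simp
    · rw [dif_neg h, if_neg (by push_cast; exact_mod_cast h)]

theorem alt_eq_pvF (numbers : List Int) (target : Int) (h : 0 ≤ target) :
    permutationsWithRepetition_alt numbers target = pvF numbers target.toNat := by
  unfold permutationsWithRepetition_alt
  rw [if_neg (by omega)]
  simp only []
  rw [pvF_table]
  rw [List.getD_eq_getElem _ _ (by simp)]
  simp

theorem dfsA_eq (numbers : List Int) (hpos : ∀ n ∈ numbers, 0 < n) :
    ∀ (fuel : Nat) (t : Int) (perm : List Int) (acc : List (List Int)), t.toNat < fuel →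
      pvDfsA numbers fuel perm acc t
        = acc ++ (if t < 0 then [] else pvF numbers t.toNat).map (fun r => perm ++ r) := by
  intro fuel
  induction fuel with
  | zero => intro t perm acc h; omega
  | succ f ih =>
    intro t perm acc hf
    by_cases h1 : t < 0
    · simp [pvDfsA, h1]
    · by_cases h2 : t = 0
      · subst h2; simp [pvDfsA, pvF]
      · have ht : 0 < t := by omega
        rw [pvDfsA, if_neg h1, if_neg h2]
        have htn : t.toNat = (t.toNat - 1) + 1 := by omega
        rw [if_neg h1, htn, pvF]
        have hcast : ((t.toNat - 1 : Nat) : Int) + 1 = t := by omega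
        -- fold step over any sublist of numbers
        have step : ∀ (L : List Int), (∀ n ∈ L, 0 < n) → ∀ (acc : List (List Int)),
            L.foldl (fun a n => pvDfsA numbers f (perm ++ [n]) a (t - n)) acc
              = acc ++ (L.flatMap (fun n =>
                  if h : 0 ≤ ((t.toNat - 1 : Nat) : Int) + 1 - n ∧ ((t.toNat - 1 : Nat) : Int) + 1 - n < ((t.toNat - 1 : Nat) : Int) + 1 then
                    (pvF numbers ((((t.toNat - 1 : Nat) : Int) + 1 - n)).toNat).map (fun rest => n :: rest)
                  else [])).map (fun r => perm ++ r) := by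
          intro L
          induction L with
          | nil => simp
          | cons n ns ihn =>
            intro hL acc
            have hn : 0 < n := hL n (by simp)
            simp only [List.foldl_cons, List.flatMap_cons, List.map_append]
            rw [ihn (fun m hm => hL m (by simp [hm]))]
            rw [ih (t - n) (perm ++ [n]) acc (by omega)]
            rw [List.append_assoc]
            congr 2
            by_cases hge : 0 ≤ t - n
            · rw [if_neg (by omega)]
              rw [dif_pos (by constructor <;> omega)]
              have : ((((t.toNat - 1 : Nat) : Int) + 1 - n)).toNat = (t - n).toNat := by omega
              rw [this, List.map_map]
              simp [Function.comp_def, List.append_assoc]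
            · rw [if_pos (by omega), dif_neg (by omega)]
              simp
        rw [step numbers hpos acc]

-- ===== VERDICT (by name: the statement is the Claim_ definition above) =====
theorem permutationsWithRepetition_spec : Claim_equal_permutationsWithRepetition := by
  intro numbers target _ hpre
  show _ = _
  by_cases hneg : target < 0
  · unfold permutationsWithRepetition permutationsWithRepetition_alt pvDfsA
    rw [if_pos hneg, if_pos hneg]
  · rw [alt_eq_pvF numbers target (by omega)]
    by_cases h0 : target = 0
    · subst h0
      unfold permutationsWithRepetition
      simp [pvDfsA, pvF]
    · have hpos : ∀ n ∈ numbers, 0 < n := by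
        rcases hpre with h | h
        · omega
        · exact h
      unfold permutationsWithRepetition
      rw [dfsA_eq numbers hpos (target.toNat + 1) target [] [] (by omega)]
      rw [if_neg hneg]
      simp
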